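-- pv_equiv track=rewrite | github.com/Takata1128/GVGAI-GAN | gan/utils.py | get_property_zelda
-- ===== SOURCE A (Python) =====
-- def get_property_zelda(level: str):
--     index_agent, index_key, index_goal = 0, 0, 0
--     for i, c in enumerate(level):
--         if c == 'A':
--             index_agent = i
--         elif c == '+':
--             index_key = i
--         elif c == 'g':
--             index_goal = i
--     return (index_agent, index_key, index_goal)
-- ===== SOURCE B (Python) =====
-- def get_property_zelda(level: str):
--     def last_pos(ch):
--         for i in range(len(level) - 1, -1, -1):
--             if level[i] == ch:
--                 return i
--         return 0
--     return (last_pos('A'), last_pos('+'), last_pos('g'))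
-- ===== Notes on version B (the rewrite author's own statement) =====
-- stated objective: alternative
-- what changed: Replaces the single forward pass that keeps three running indices with three independent reverse scans, each returning at the first (i.e. last) occurrence of its character and 0 if absent.
import Mathlib
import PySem

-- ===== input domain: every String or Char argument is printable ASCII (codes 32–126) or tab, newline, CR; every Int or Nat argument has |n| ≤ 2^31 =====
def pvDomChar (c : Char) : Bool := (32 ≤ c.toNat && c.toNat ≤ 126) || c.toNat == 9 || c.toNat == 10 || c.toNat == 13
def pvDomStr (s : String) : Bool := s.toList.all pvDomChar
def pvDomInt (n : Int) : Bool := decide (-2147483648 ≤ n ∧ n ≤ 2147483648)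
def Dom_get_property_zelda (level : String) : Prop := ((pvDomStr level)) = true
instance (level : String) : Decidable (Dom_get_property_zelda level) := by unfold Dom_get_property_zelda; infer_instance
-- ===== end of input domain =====

-- B replaces A's single forward pass with three independent reverse scans (one per character,
-- stopping at the first hit from the end); same cost, different traversal.

-- ===== PORT A =====
def get_property_zelda (level : String) : Int × Int × Int :=
  (PySem.List.enumerate level.toList 0).foldl
    (fun s p =>
      if p.2 = 'A' then (p.1, s.2.1, s.2.2)
      else if p.2 = '+' then (s.1, p.1, s.2.2)
      else if p.2 = 'g' then (s.1, s.2.1, p.1)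
      else s)
    (0, 0, 0)

-- ===== PORT B =====
-- B's reverse loop `for i in range(len-1,-1,-1): if level[i]==ch: return i` ports as a
-- structural recursion over the reversed character list, tracking n = i+1.
def lastPosGo (rcs : List Char) (n : Nat) (ch : Char) : Int :=
  match rcs with
  | [] => 0
  | x :: xs => if x = ch then (n : Int) - 1 else lastPosGo xs (n - 1) ch

def get_property_zelda_alt (level : String) : Int × Int × Int :=
  let cs := level.toList
  (lastPosGo cs.reverse cs.length 'A',
   lastPosGo cs.reverse cs.length '+',
   lastPosGo cs.reverse cs.length 'g')

-- ===== PRECONDITION & SPEC =====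
def Spec_get_property_zelda (level : String) (out : Int × Int × Int) : Prop := out = get_property_zelda_alt level
instance (level : String) (out : Int × Int × Int) : Decidable (Spec_get_property_zelda level out) := by unfold Spec_get_property_zelda; infer_instance

-- ===== CLAIM (what is proved, stated in full; the proofs are below) =====
def Claim_equal_get_property_zelda : Prop := ∀ (level : String), Dom_get_property_zelda level → Spec_get_property_zelda level (get_property_zelda level)

-- ===== LEMMAS AND PROOFS =====

-- one component of A's fold, in isolation
def fold1 (ch : Char) (cs : List Char) (s : Int) (v : Int) : Int :=
  (PySem.List.enumerate cs s).foldl (fun a p => if p.2 = ch then p.1 else a) v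

lemma foldA_proj (cs : List Char) (s v1 v2 v3 : Int) :
    (PySem.List.enumerate cs s).foldl
      (fun st p =>
        if p.2 = 'A' then (p.1, st.2.1, st.2.2)
        else if p.2 = '+' then (st.1, p.1, st.2.2)
        else if p.2 = 'g' then (st.1, st.2.1, p.1)
        else st)
      (v1, v2, v3)
    = (fold1 'A' cs s v1, fold1 '+' cs s v2, fold1 'g' cs s v3) := by
  induction cs generalizing s v1 v2 v3 with
  | nil => simp [fold1, PySem.List.enumerate_nil]
  | cons c t ih =>
      simp only [fold1, PySem.List.enumerate_cons, List.foldl_cons]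
      by_cases hA : c = 'A'
      · subst hA; simp [ih, fold1]
      · by_cases hK : c = '+'
        · subst hK; simp [ih, fold1]
        · by_cases hG : c = 'g'
          · subst hG; simp [ih, fold1]
          · simp [hA, hK, hG, ih, fold1]

lemma fold1_append (ch : Char) (cs : List Char) (c : Char) (s v : Int) :
    fold1 ch (cs ++ [c]) s v = if c = ch then s + cs.length else fold1 ch cs s v := by
  simp [fold1, PySem.List.enumerate_append, PySem.List.enumerate_cons,
        PySem.List.enumerate_nil, List.foldl_append]

lemma fold1_eq_lastPos (ch : Char) (cs : List Char) :
    fold1 ch cs 0 0 = lastPosGo cs.reverse cs.length ch := by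
  induction cs using List.reverseRecOn with
  | nil => simp [fold1, PySem.List.enumerate_nil, lastPosGo]
  | append_singleton t c ih =>
      rw [fold1_append]
      simp only [List.reverse_append, List.reverse_singleton, List.singleton_append,
        List.length_append, List.length_singleton, lastPosGo]
      split_ifs with h
      · push_cast; ring
      · simpa using ih

-- ===== VERDICT (by name: the statement is the Claim_ definition above) =====
theorem get_property_zelda_spec : Claim_equal_get_property_zelda := by
  intro level _
  unfold Spec_get_property_zelda get_property_zelda get_property_zelda_alt
  rw [foldA_proj]
  simp [fold1_eq_lastPos]
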